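-- pv_equiv track=rewrite | github.com/Aryudesu/ABC | ABC/300_399/378/D.py | calc
-- ===== SOURCE A (Python) =====
-- def calc(K, depth: int, graph: dict, node: int, memo: set):
--     if depth == K:
--         return 1
--     nodes = graph.get(node, [])
--     tmp = 0
--     for n in nodes:
--         if not n in memo:
--             memo.add(n)
--             tmp += calc(K, depth + 1, graph, n, memo)
--             memo.discard(n)
--     return tmp
-- ===== SOURCE B (Python) =====
-- def calc(K, depth: int, graph: dict, node: int, memo: set):
--     steps = K - depth
--     if steps < 0:
--         return 0
--     frontier = [(node, frozenset(memo))]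
--     for _ in range(steps):
--         if not frontier:
--             break
--         frontier = [(m, vis | {m})
--                     for (v, vis) in frontier
--                     for m in graph.get(v, [])
--                     if m not in vis]
--     return len(frontier)
-- ===== Notes on version B (the rewrite author's own statement) =====
-- stated objective: alternative
-- what changed: Replaced the recursive backtracking DFS (mutating a shared memo set) with an iterative breadth-first frontier expansion: a list of (node, visited-set) states is expanded K-depth times and the answer is the final frontier length; memo is never mutated.
import Mathlib
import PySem

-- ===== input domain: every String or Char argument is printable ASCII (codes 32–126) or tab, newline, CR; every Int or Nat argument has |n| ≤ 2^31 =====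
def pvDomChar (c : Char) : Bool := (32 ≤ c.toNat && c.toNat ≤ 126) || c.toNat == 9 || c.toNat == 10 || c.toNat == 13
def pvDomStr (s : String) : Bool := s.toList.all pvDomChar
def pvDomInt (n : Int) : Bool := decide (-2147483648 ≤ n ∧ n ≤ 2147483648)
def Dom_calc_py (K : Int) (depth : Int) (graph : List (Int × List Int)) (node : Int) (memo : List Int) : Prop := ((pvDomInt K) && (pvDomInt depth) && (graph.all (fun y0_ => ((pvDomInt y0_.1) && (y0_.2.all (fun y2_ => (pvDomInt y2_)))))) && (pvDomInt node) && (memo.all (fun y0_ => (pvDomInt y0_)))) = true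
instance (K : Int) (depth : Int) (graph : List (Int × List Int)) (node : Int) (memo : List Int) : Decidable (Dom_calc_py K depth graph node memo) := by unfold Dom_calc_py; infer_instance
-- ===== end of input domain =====

-- B replaces A's recursive backtracking DFS by an iterative breadth-first frontier expansion
-- (same return value; A temporarily mutates `memo` but leaves it net-unchanged, B never mutates it).

-- ===== PORT A =====
-- graph.get(v, [])  (shared adjacency lookup, used by both ports)
def pvAdj (graph : List (Int × List Int)) (v : Int) : List Int :=
  PySem.Dict.getD (PySem.Dict.mk graph) v []

-- A's recursion, fueled for totality: the recursion depth is bounded by the number of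
-- distinct adjacency-list values not in memo (memo gains one such value per level),
-- so fuel = (graph.flatMap Prod.snd).length + 1 is always sufficient.
def pvCalcA (fuel : Nat) (K : Int) (depth : Int) (graph : List (Int × List Int)) (node : Int) (memo : List Int) : Int :=
  match fuel with
  | 0 => 0
  | fuel + 1 =>
    if depth = K then 1
    else
      -- for n in nodes: if not n in memo: memo.add(n); tmp += calc(...); memo.discard(n)
      (pvAdj graph node).foldl
        (fun tmp n =>
          if PySem.Set.contains memo n then tmp
          else tmp + pvCalcA fuel K (depth + 1) graph n (PySem.Set.add memo n)) 0

def calc_py (K : Int) (depth : Int) (graph : List (Int × List Int)) (node : Int) (memo : List Int) : Int :=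
  pvCalcA ((graph.flatMap Prod.snd).length + 1) K depth graph node memo

-- ===== PORT B =====
-- one frontier step: [(m, vis | {m}) for (v, vis) in frontier for m in graph.get(v, []) if m not in vis]
def pvStep (graph : List (Int × List Int)) (fr : List (Int × List Int)) : List (Int × List Int) :=
  fr.flatMap (fun p =>
    ((pvAdj graph p.1).filter (fun m => !PySem.Set.contains p.2 m)).map
      (fun m => (m, PySem.Set.union p.2 [m])))

-- for _ in range(steps): if not frontier: break; frontier = step(frontier)
def pvLoopB (graph : List (Int × List Int)) : Nat → List (Int × List Int) → List (Int × List Int)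
  | 0, fr => fr
  | s + 1, fr => if fr = [] then fr else pvLoopB graph s (pvStep graph fr)

def calc_py_alt (K : Int) (depth : Int) (graph : List (Int × List Int)) (node : Int) (memo : List Int) : Int :=
  let steps := K - depth
  if steps < 0 then 0
  else ((pvLoopB graph steps.toNat [(node, PySem.Set.ofList memo)]).length : Int)

-- ===== PRECONDITION & SPEC =====
def Spec_calc_py (K : Int) (depth : Int) (graph : List (Int × List Int)) (node : Int) (memo : List Int) (out : Int) : Prop := out = calc_py_alt K depth graph node memo
instance (K : Int) (depth : Int) (graph : List (Int × List Int)) (node : Int) (memo : List Int) (out : Int) : Decidable (Spec_calc_py K depth graph node memo out) := by unfold Spec_calc_py; infer_instance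

-- ===== CLAIM (what is proved, stated in full; the proofs are below) =====
def Claim_equal_calc_py : Prop := ∀ (K : Int) (depth : Int) (graph : List (Int × List Int)) (node : Int) (memo : List Int), Dom_calc_py K depth graph node memo → Spec_calc_py K depth graph node memo (calc_py K depth graph node memo)

-- ===== LEMMAS AND PROOFS =====

-- reference count: number of self-avoiding continuations of s more steps from v, avoiding vis
def pvCnt (graph : List (Int × List Int)) : Nat → Int → List Int → Int
  | 0, _, _ => 1
  | s + 1, v, vis =>
      (((pvAdj graph v).filter (fun m => !PySem.Set.contains vis m)).map
        (fun m => pvCnt graph s m (PySem.Set.add vis m))).sum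

theorem pv_contains_add (s : List Int) (m x : Int) :
    PySem.Set.contains (PySem.Set.add s m) x = (PySem.Set.contains s x || x == m) := by
  by_cases hm : m ∈ s
  · by_cases hx : x = m
    · subst hx; simp [PySem.Set.add, PySem.Set.contains, hm]
    · simp [PySem.Set.add, PySem.Set.contains, hm, hx]
  · by_cases hx : x = m
    · subst hx; simp [PySem.Set.add, PySem.Set.contains, hm]
    · simp [PySem.Set.add, PySem.Set.contains, hm, hx]

theorem pv_contains_ofList (s : List Int) (x : Int) :
    PySem.Set.contains (PySem.Set.ofList s) x = PySem.Set.contains s x := by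
  simp [PySem.Set.contains_eq_listContains]

theorem pv_foldl_if_sum (p : Int → Bool) (f : Int → Int) (xs : List Int) (a : Int) :
    xs.foldl (fun t n => if p n then t else t + f n) a
      = a + ((xs.filter (fun n => !p n)).map f).sum := by
  induction xs generalizing a with
  | nil => simp
  | cons x xs ih =>
      simp only [List.foldl_cons, List.filter_cons]
      by_cases h : p x
      · simp [h, ih]
      · simp [h, ih (a + f x)]; ring

theorem pv_cnt_congr (g : List (Int × List Int)) (s : Nat) :
    ∀ v vis1 vis2, (∀ x, PySem.Set.contains vis1 x = PySem.Set.contains vis2 x) →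
      pvCnt g s v vis1 = pvCnt g s v vis2 := by
  induction s with
  | zero => intro v vis1 vis2 _; rfl
  | succ s ih =>
      intro v vis1 vis2 h
      simp only [pvCnt]
      have hf : (pvAdj g v).filter (fun m => !PySem.Set.contains vis1 m)
          = (pvAdj g v).filter (fun m => !PySem.Set.contains vis2 m) := by
        apply List.filter_congr; intro m _; rw [h]
      rw [hf]
      congr 1
      apply List.map_congr_left
      intro m _
      exact ih m _ _ (fun x => by rw [pv_contains_add, pv_contains_add, h])

theorem pv_calcA_gt (fuel : Nat) : ∀ (K depth : Int) g node memo, K < depth →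
    pvCalcA fuel K depth g node memo = 0 := by
  induction fuel with
  | zero => intro K depth g node memo _; rfl
  | succ fuel ih =>
      intro K depth g node memo h
      simp only [pvCalcA]
      rw [if_neg (by omega)]
      rw [pv_foldl_if_sum]
      have : ((pvAdj g node).filter (fun n => !PySem.Set.contains memo n)).map
          (fun n => pvCalcA fuel K (depth + 1) g n (PySem.Set.add memo n))
          = ((pvAdj g node).filter (fun n => !PySem.Set.contains memo n)).map (fun _ => (0 : Int)) := by
        apply List.map_congr_left; intro n _; exact ih K (depth + 1) g n _ (by omega)
      rw [this]
      simp

-- measure: distinct adjacency values not yet in memo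
def pvMeas (g : List (Int × List Int)) (memo : List Int) : Nat :=
  ((PySem.List.dedup (g.flatMap Prod.snd)).filter (fun x => !PySem.Set.contains memo x)).length

theorem pv_adj_subset (g : List (Int × List Int)) (v : Int) :
    ∀ m ∈ pvAdj g v, m ∈ g.flatMap Prod.snd := by
  induction g with
  | nil => intro m hm; simp [pvAdj, PySem.Dict.getD, PySem.Dict.get?] at hm
  | cons p g ih =>
      intro m hm
      obtain ⟨k, l⟩ := p
      rw [show pvAdj ((k, l) :: g) v = if k == v then l else pvAdj g v by
        simp only [pvAdj, PySem.Dict.getD_eq_get?_getD, PySem.Dict.get?_mk_cons]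
        split <;> rfl] at hm
      simp only [List.flatMap_cons, List.mem_append]
      by_cases h : k == v
      · rw [if_pos h] at hm; exact Or.inl hm
      · rw [if_neg h] at hm; exact Or.inr (ih m hm)

theorem pv_meas_lt (g : List (Int × List Int)) (memo : List Int) (n : Int)
    (hn : n ∈ g.flatMap Prod.snd) (hm : PySem.Set.contains memo n = false) :
    pvMeas g (PySem.Set.add memo n) < pvMeas g memo := by
  unfold pvMeas
  have h1 : ∀ x : Int, (!PySem.Set.contains (PySem.Set.add memo n) x)
      = ((!PySem.Set.contains memo x) && !(x == n)) := by
    intro x; rw [pv_contains_add]; cases hx : PySem.Set.contains memo x <;> simp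
  simp only [h1]
  rw [show ((PySem.List.dedup (g.flatMap Prod.snd)).filter
        (fun x => (!PySem.Set.contains memo x) && !(x == n)))
      = ((PySem.List.dedup (g.flatMap Prod.snd)).filter
        (fun x => !PySem.Set.contains memo x)).filter (fun x => !(x == n)) by
    rw [List.filter_filter]
    apply List.filter_congr; intro x _; rw [Bool.and_comm]]
  apply List.length_filter_lt_length_iff_exists.mpr
  exact ⟨n, List.mem_filter.mpr ⟨by simpa using hn, by simpa [PySem.Set.contains] using hm⟩, by simp⟩

theorem pv_calcA_eq_cnt (fuel : Nat) :
    ∀ (K depth : Int) g node memo, pvMeas g memo < fuel → depth ≤ K →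
      pvCalcA fuel K depth g node memo = pvCnt g (K - depth).toNat node memo := by
  induction fuel with
  | zero => intro K depth g node memo h _; omega
  | succ fuel ih =>
      intro K depth g node memo hfuel hdk
      simp only [pvCalcA]
      by_cases h : depth = K
      · subst h; simp [pvCnt]
      · have hlt : depth < K := by omega
        have hs : (K - depth).toNat = (K - (depth + 1)).toNat + 1 := by omega
        rw [if_neg h, hs]
        simp only [pvCnt]
        rw [pv_foldl_if_sum]
        rw [zero_add]
        congr 1
        apply List.map_congr_left
        intro n hn
        have hmem := List.mem_filter.mp hn
        have hnc : PySem.Set.contains memo n = false := by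
          simpa using hmem.2
        exact ih K (depth + 1) g n (PySem.Set.add memo n)
          (by
            have := pv_meas_lt g memo n (pv_adj_subset g node n hmem.1) hnc
            omega)
          (by omega)

theorem pv_sum_flatMap {α : Type} (l : List α) (f : α → List Int) :
    (l.flatMap f).sum = (l.map (fun a => (f a).sum)).sum := by
  induction l with
  | nil => simp
  | cons a l ih => simp [List.flatMap_cons, ih]

theorem pv_loopB_len (g : List (Int × List Int)) :
    ∀ (s : Nat) (fr : List (Int × List Int)),
      ((pvLoopB g s fr).length : Int) = (fr.map (fun p => pvCnt g s p.1 p.2)).sum := by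
  intro s
  induction s with
  | zero =>
      intro fr
      simp [pvLoopB, pvCnt]
  | succ s ih =>
      intro fr
      simp only [pvLoopB]
      by_cases h : fr = []
      · subst h; simp
      · rw [if_neg h, ih]
        simp only [pvStep, List.map_flatMap, pv_sum_flatMap, List.map_map, pvCnt]
        rfl

theorem pv_foldl_add_len (xs : List Int) : ∀ s : List Int,
    (xs.foldl PySem.Set.add s).length ≤ s.length + xs.length := by
  induction xs with
  | nil => intro s; simp
  | cons x xs ih =>
      intro s
      simp only [List.foldl_cons, List.length_cons]
      have h2 : (PySem.Set.add s x).length ≤ s.length + 1 := by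
        simp only [PySem.Set.add]; split <;> simp
      have := ih (PySem.Set.add s x)
      omega

theorem pv_meas_le (g : List (Int × List Int)) (memo : List Int) :
    pvMeas g memo ≤ (g.flatMap Prod.snd).length := by
  unfold pvMeas
  calc _ ≤ (PySem.List.dedup (g.flatMap Prod.snd)).length := List.length_filter_le _ _
    _ ≤ _ := by
      rw [PySem.List.dedup_eq_ofList, PySem.Set.ofList_eq_foldl]
      simpa using pv_foldl_add_len (g.flatMap Prod.snd) []

-- ===== VERDICT (by name: the statement is the Claim_ definition above) =====
theorem calc_py_spec : Claim_equal_calc_py := by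
  intro K depth g node memo _
  unfold Spec_calc_py calc_py calc_py_alt
  by_cases h : K - depth < 0
  · rw [pv_calcA_gt _ K depth g node memo (by omega)]
    simp [h]
  · simp only [h, if_false]
    rw [pv_calcA_eq_cnt _ K depth g node memo
        (by have := pv_meas_le g memo; omega) (by omega)]
    rw [pv_loopB_len]
    simp only [List.map_cons, List.map_nil, List.sum_cons, List.sum_nil, add_zero]
    exact pv_cnt_congr g _ node memo (PySem.Set.ofList memo)
      (fun x => (pv_contains_ofList memo x).symm)
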